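-- pv_equiv track=rewrite | github.com/shubham-goel/advent_of_code | 2020/d24.py | get_tile_adjblack
-- ===== SOURCE A (Python) =====
-- from collections import defaultdict
--
-- def tile_to_adj(tile):
--     ne,se = tile
--     return [
--         (ne+1, se),
--         (ne, se+1),
--         (ne+1, se+1),
--         (ne-1, se),
--         (ne, se-1),
--         (ne-1, se-1),
--     ]
--
-- def get_tile_adjblack(tile_flips):
--     tile_adjblack = defaultdict(lambda: 0)
--     for tile, count in tile_flips.items():
--         if count%2==1:
--             # Tile is black. Increase counter of adj tiles
--             adj_tiles = tile_to_adj(tile)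
--             for tile2 in adj_tiles:
--                 tile_adjblack[tile2] += 1
--     return tile_adjblack
-- ===== SOURCE B (Python) =====
-- from collections import defaultdict, Counter
--
-- def tile_to_adj(tile):
--     ne, se = tile
--     return [
--         (ne+1, se),
--         (ne, se+1),
--         (ne+1, se+1),
--         (ne-1, se),
--         (ne, se-1),
--         (ne-1, se-1),
--     ]
--
-- def get_tile_adjblack(tile_flips):
--     blacks = [tile for tile, count in tile_flips.items() if count % 2 == 1]
--     cnt = Counter(blacks)
--     cands = list(dict.fromkeys(n for t in blacks for n in tile_to_adj(t)))
--     out = defaultdict(lambda: 0)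
--     for k in cands:
--         out[k] = sum(cnt[n] for n in tile_to_adj(k))
--     return out
-- ===== Notes on version B (the rewrite author's own statement) =====
-- stated objective: alternative
-- what changed: Instead of incrementing a per-neighbor counter inside the loop over black tiles, B first collects the black tiles, deduplicates the neighbor stream to get the candidate keys in first-insertion order, and computes each candidate's value in one shot as the sum (over its six neighbors, using hex-adjacency symmetry) of that neighbor's multiplicity among the black tiles.
import Mathlib
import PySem

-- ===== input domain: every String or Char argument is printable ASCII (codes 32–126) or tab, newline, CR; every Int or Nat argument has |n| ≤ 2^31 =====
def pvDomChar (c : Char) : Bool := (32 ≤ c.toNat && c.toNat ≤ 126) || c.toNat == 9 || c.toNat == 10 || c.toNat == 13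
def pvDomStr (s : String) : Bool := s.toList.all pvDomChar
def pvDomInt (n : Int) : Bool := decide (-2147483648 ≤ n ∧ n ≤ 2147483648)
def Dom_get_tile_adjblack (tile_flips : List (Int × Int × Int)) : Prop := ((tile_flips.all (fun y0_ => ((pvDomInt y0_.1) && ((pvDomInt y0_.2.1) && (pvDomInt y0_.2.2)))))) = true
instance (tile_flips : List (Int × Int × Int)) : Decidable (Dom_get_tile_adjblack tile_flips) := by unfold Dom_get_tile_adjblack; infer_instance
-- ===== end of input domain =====

-- B computes the same defaultdict without an incrementing inner loop: it gathers the black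
-- tiles, dedups their neighbor stream into the candidate keys, and values each candidate by
-- summing its neighbors' multiplicities among the black tiles (objective: alternative).

-- ===== PORT A =====
-- helper tile_to_adj, shared verbatim by both Pythons
def tileToAdj (t : Int × Int) : List (Int × Int) :=
  [(t.1 + 1, t.2), (t.1, t.2 + 1), (t.1 + 1, t.2 + 1),
   (t.1 - 1, t.2), (t.1, t.2 - 1), (t.1 - 1, t.2 - 1)]

def get_tile_adjblack (tile_flips : List (Int × Int × Int)) : List (Int × Int × Int) :=
  let d := tile_flips.foldl
    (fun d e =>
      if PySem.Int.mod e.2.2 2 == 1 then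
        (tileToAdj (e.1, e.2.1)).foldl (fun d t2 => d.insert t2 (d.getD t2 0 + 1)) d
      else d)
    PySem.Dict.empty
  d.items.map (fun p => (p.1.1, p.1.2, p.2))

-- ===== PORT B =====
def get_tile_adjblack_alt (tile_flips : List (Int × Int × Int)) : List (Int × Int × Int) :=
  let blacks := (tile_flips.filter (fun e => PySem.Int.mod e.2.2 2 == 1)).map
    (fun e => (e.1, e.2.1))
  let cnt := PySem.Dict.counter blacks
  let cands := PySem.List.dedup (blacks.flatMap tileToAdj)
  cands.map (fun k => (k.1, k.2, ((tileToAdj k).map (fun n => cnt.getD n 0)).sum))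

-- ===== PRECONDITION & SPEC =====
def Spec_get_tile_adjblack (tile_flips : List (Int × Int × Int)) (out : List (Int × Int × Int)) : Prop := out = get_tile_adjblack_alt tile_flips
instance (tile_flips : List (Int × Int × Int)) (out : List (Int × Int × Int)) : Decidable (Spec_get_tile_adjblack tile_flips out) := by unfold Spec_get_tile_adjblack; infer_instance

-- ===== CLAIM (what is proved, stated in full; the proofs are below) =====
def Claim_equal_get_tile_adjblack : Prop := ∀ (tile_flips : List (Int × Int × Int)), Dom_get_tile_adjblack tile_flips → Spec_get_tile_adjblack tile_flips (get_tile_adjblack tile_flips)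

-- ===== LEMMAS AND PROOFS =====

-- the black tiles, as B extracts them
def blacksOf (tile_flips : List (Int × Int × Int)) : List (Int × Int) :=
  (tile_flips.filter (fun e => PySem.Int.mod e.2.2 2 == 1)).map (fun e => (e.1, e.2.1))

-- A's nested counting loop is the counter fold over the flattened neighbor stream
theorem foldA_eq_stream (tile_flips : List (Int × Int × Int))
    (d : PySem.Dict (Int × Int) Int) :
    tile_flips.foldl
      (fun d e =>
        if PySem.Int.mod e.2.2 2 == 1 then
          (tileToAdj (e.1, e.2.1)).foldl (fun d t2 => d.insert t2 (d.getD t2 0 + 1)) d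
        else d) d
    = ((blacksOf tile_flips).flatMap tileToAdj).foldl
        (fun d t2 => d.insert t2 (d.getD t2 0 + 1)) d := by
  induction tile_flips generalizing d with
  | nil => simp [blacksOf]
  | cons e tf ih =>
    by_cases h : (PySem.Int.mod e.2.2 2 == 1) = true
    · have h' : e.2.2 % 2 = 1 := by simpa using h
      have hb : blacksOf (e :: tf) = (e.1, e.2.1) :: blacksOf tf := by
        simp [blacksOf, h']
      rw [List.foldl_cons, if_pos h, hb, List.flatMap_cons, List.foldl_append, ih]
    · have h' : ¬ e.2.2 % 2 = 1 := by simpa using h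
      have hb : blacksOf (e :: tf) = blacksOf tf := by
        simp [blacksOf, h']
      rw [List.foldl_cons, if_neg h, hb, ih]

-- occurrences of k in the neighbor stream = sum, over k's six neighbors, of their
-- multiplicity among the black tiles (hex adjacency is symmetric)
theorem stream_count (blacks : List (Int × Int)) (k : Int × Int) :
    ((blacks.flatMap tileToAdj).count k : Int)
      = ((tileToAdj k).map (fun n => (blacks.count n : Int))).sum := by
  obtain ⟨c, d⟩ := k
  induction blacks with
  | nil => simp [tileToAdj]
  | cons t bs ih =>
    obtain ⟨p, q⟩ := t
    rw [List.flatMap_cons, List.count_append]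
    push_cast
    rw [ih]
    simp only [tileToAdj, List.map_cons, List.map_nil, List.sum_cons, List.sum_nil,
      List.count_cons, List.count_nil, beq_iff_eq, Prod.mk.injEq]
    have h1 : (p - 1 = c ∧ q - 1 = d) ↔ (p = c + 1 ∧ q = d + 1) := by omega
    have h2 : (p = c ∧ q - 1 = d) ↔ (p = c ∧ q = d + 1) := by omega
    have h3 : (p - 1 = c ∧ q = d) ↔ (p = c + 1 ∧ q = d) := by omega
    have h4 : (p + 1 = c ∧ q + 1 = d) ↔ (p = c - 1 ∧ q = d - 1) := by omega
    have h5 : (p = c ∧ q + 1 = d) ↔ (p = c ∧ q = d - 1) := by omega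
    have h6 : (p + 1 = c ∧ q = d) ↔ (p = c - 1 ∧ q = d) := by omega
    simp only [h1, h2, h3, h4, h5, h6]
    push_cast
    split_ifs <;> ring

theorem get_tile_adjblack_eq (tile_flips : List (Int × Int × Int)) :
    get_tile_adjblack tile_flips = get_tile_adjblack_alt tile_flips := by
  have hb : (tile_flips.filter (fun e => PySem.Int.mod e.2.2 2 == 1)).map
      (fun e => (e.1, e.2.1)) = blacksOf tile_flips := rfl
  simp only [get_tile_adjblack, get_tile_adjblack_alt, hb]
  rw [foldA_eq_stream, PySem.Dict.foldl_insert_getD_add_one_eq_counter,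
    PySem.Dict.items_counter, PySem.List.dedup_eq_ofList, List.map_map]
  apply List.map_congr_left
  intro k _
  have hc : ∀ n : Int × Int, (PySem.Dict.counter (blacksOf tile_flips)).getD n 0
      = ((blacksOf tile_flips).count n : Int) :=
    fun n => PySem.Dict.getD_counter (blacksOf tile_flips) n
  simp only [Function.comp_apply, hc]
  rw [stream_count]

-- ===== VERDICT (by name: the statement is the Claim_ definition above) =====
theorem get_tile_adjblack_spec : Claim_equal_get_tile_adjblack := by
  intro tf _
  unfold Spec_get_tile_adjblack
  exact get_tile_adjblack_eq tf
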